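-- pv_equiv track=rewrite | github.com/ilyas-asmouki/EST-message-processing-unit | mpu/model/interleaver.py | _perm_indices_for_block
-- ===== SOURCE A (Python) =====
-- from typing import List
-- import math
--
-- def _perm_indices_for_block(block_len: int, I: int) -> List[int]:
--     # builds a permutation that maps original byte positions -> interleaved positions
--     # construction:
--     # - rows = I, cols = ceil(block_len / I)
--     # - write row-wise, read column-wise (skip out-of-range)
--     if I == 1:
--         return list(range(block_len))
--
--     rows = I
--     cols = math.ceil(block_len / rows)
--
--     # fill row wise with original indices, pad with -1 to mark empty cells.
--     grid: List[List[int]] = [[-1] * cols for _ in range(rows)]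
--     idx = 0
--     for r in range(rows):
--         for c in range(cols):
--             if idx < block_len:
--                 grid[r][c] = idx
--                 idx += 1
--
--     # read column-wise to get output order
--     order: List[int] = []
--     for c in range(cols):
--         for r in range(rows):
--             v = grid[r][c]
--             if v != -1:
--                 order.append(v)
--
--     # order[k] = source_index that moves to position k
--     # We want perm such that out[k] = in[perm[k]]
--     perm = order
--     assert len(perm) == block_len
--     return perm
-- ===== SOURCE B (Python) =====
-- from typing import List
--
-- def _perm_indices_for_block(block_len: int, I: int) -> List[int]:
--     # single pass, no grid, no -1 padding: the cell at (row r, col c) holds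
--     # source index r*cols + c; read columns outer, rows inner, skipping
--     # indices past the end of the block.
--     rows = I
--     cols = -(-block_len // rows)  # ceil(block_len / rows)
--     return [r * cols + c
--             for c in range(cols)
--             for r in range(rows)
--             if r * cols + c < block_len]
-- ===== Notes on version B (the rewrite author's own statement) =====
-- stated objective: simpler
-- what changed: Eliminates the grid: instead of allocating a rows x cols table, filling it row-wise with -1 padding and then scanning it column-wise, B computes each source index arithmetically as r*cols+c in a single column-major comprehension.
import Mathlib
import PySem

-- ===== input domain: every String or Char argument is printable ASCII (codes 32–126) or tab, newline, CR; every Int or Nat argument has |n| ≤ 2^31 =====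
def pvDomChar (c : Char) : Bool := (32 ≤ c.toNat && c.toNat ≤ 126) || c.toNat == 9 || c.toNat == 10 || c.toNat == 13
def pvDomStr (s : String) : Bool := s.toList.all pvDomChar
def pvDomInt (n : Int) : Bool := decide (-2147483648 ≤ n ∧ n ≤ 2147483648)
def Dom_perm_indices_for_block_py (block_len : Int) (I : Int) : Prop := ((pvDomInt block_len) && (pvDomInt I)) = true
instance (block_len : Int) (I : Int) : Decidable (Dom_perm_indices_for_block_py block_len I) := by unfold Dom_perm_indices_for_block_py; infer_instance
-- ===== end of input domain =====

-- B drops A's grid, its fill pass and the -1 padding, computing each source index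
-- arithmetically in a single column-major pass (objective: simpler).

-- ===== PORT A =====
-- math.ceil(block_len / rows) is ported as the integer ceiling -((-block_len) // rows);
-- exact on Dom (|arguments| ≤ 2^31 < 2^53, so the float quotient's ceiling is the exact ceiling).
-- grid[r][c] reads are in range whenever they are reached, so the `.getD (-1)` default of the
-- port's lookup is never used; the assert (which holds on Pre_) is a no-op and is dropped.
def perm_indices_for_block_py (block_len : Int) (I : Int) : List Int :=
  if I == 1 then PySem.List.pyRange 0 block_len 1
  else
    let rows := I
    let cols := -(PySem.Int.floordiv (-block_len) rows)
    -- [-1]*cols for an Int cols: empty when cols ≤ 0, exactly List.replicate cols.toNat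
    let grid : List (List Int) := (PySem.List.pyRange 0 rows 1).map
      (fun _ => List.replicate cols.toNat (-1 : Int))
    let fill := (PySem.List.pyRange 0 rows 1).foldl (fun (st : List (List Int) × Int) r =>
        (PySem.List.pyRange 0 cols 1).foldl (fun (st : List (List Int) × Int) c =>
          if st.2 < block_len then
            (st.1.modify r.toNat (fun row => row.set c.toNat st.2), st.2 + 1)
          else st) st)
      (grid, 0)
    (PySem.List.pyRange 0 cols 1).foldl (fun (acc : List Int) c =>
        (PySem.List.pyRange 0 rows 1).foldl (fun (acc : List Int) r =>
          let v := ((PySem.List.pyGet? fill.1 r).bind (fun row => PySem.List.pyGet? row c)).getD (-1)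
          if v ≠ -1 then acc ++ [v] else acc) acc) []

-- ===== PORT B =====
def perm_indices_for_block_py_alt (block_len : Int) (I : Int) : List Int :=
  let rows := I
  let cols := -(PySem.Int.floordiv (-block_len) rows)
  (PySem.List.pyRange 0 cols 1).flatMap (fun c =>
    (PySem.List.pyRange 0 rows 1).filterMap (fun r =>
      if r * cols + c < block_len then some (r * cols + c) else none))

-- ===== PRECONDITION & SPEC =====
-- Pre_ is exactly where the Python A returns: it excludes I = 0 (ZeroDivisionError),
-- I ≥ 2 with block_len < 0 and I ≤ -1 with block_len ≠ 0 (both raise AssertionError).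
def Pre_perm_indices_for_block_py (block_len : Int) (I : Int) : Prop :=
  I = 1 ∨ (2 ≤ I ∧ 0 ≤ block_len) ∨ (I ≤ -1 ∧ block_len = 0)
instance (block_len : Int) (I : Int) : Decidable (Pre_perm_indices_for_block_py block_len I) := by
  unfold Pre_perm_indices_for_block_py; infer_instance
def pvWitness_perm_indices_for_block_py : Int × Int := (7, 3)
def Spec_perm_indices_for_block_py (block_len : Int) (I : Int) (out : List Int) : Prop := out = perm_indices_for_block_py_alt block_len I
instance (block_len : Int) (I : Int) (out : List Int) : Decidable (Spec_perm_indices_for_block_py block_len I out) := by unfold Spec_perm_indices_for_block_py; infer_instance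

-- ===== CLAIM (what is proved, stated in full; the proofs are below) =====
def Claim_equal_perm_indices_for_block_py : Prop := ∀ (block_len : Int) (I : Int), Dom_perm_indices_for_block_py block_len I → Pre_perm_indices_for_block_py block_len I → Spec_perm_indices_for_block_py block_len I (perm_indices_for_block_py block_len I)

-- ===== LEMMAS AND PROOFS =====

-- proof-side reformulations of A's loops over Nat indices
def pvRowC (L : Int) (st : List Int × Int) (k : Nat) : List Int × Int :=
  if st.2 < L then (st.1.set k st.2, st.2 + 1) else st

def pvFillC (L : Int) (r : Nat) (st : List (List Int) × Int) (k : Nat) : List (List Int) × Int :=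
  if st.2 < L then (st.1.modify r (fun row => row.set k st.2), st.2 + 1) else st

def pvIdxC (L : Int) (i : Int) (cs : List Nat) : Int :=
  cs.foldl (fun j _ => if j < L then j + 1 else j) i

lemma pvIdxC_spec (L : Int) (cs : List Nat) : ∀ (i : Int), i ≤ L →
    pvIdxC L i cs = min (i + cs.length) L := by
  induction cs with
  | nil => intro i h; simp [pvIdxC]; omega
  | cons c cs ih =>
    intro i h
    simp only [pvIdxC, List.foldl_cons] at *
    by_cases hi : i < L
    · rw [if_pos hi, ih (i+1) (by omega)]; simp; omega
    · rw [if_neg hi, ih i h]; simp; omega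

lemma pvModify_modify {α : Type} (g : List α) (r : Nat) (f h : α → α) :
    (g.modify r f).modify r h = g.modify r (fun x => h (f x)) := by
  apply List.ext_getElem
  · simp
  · intro j h1 h2
    simp [List.getElem_modify]
    by_cases hj : r = j <;> simp [hj]

lemma pvSep (L : Int) (r : Nat) (cs : List Nat) : ∀ (g : List (List Int)) (i : Int),
    cs.foldl (pvFillC L r) (g, i)
      = (g.modify r (fun row => (cs.foldl (pvRowC L) (row, i)).1), pvIdxC L i cs) := by
  induction cs with
  | nil =>
    intro g i
    simp only [List.foldl_nil]
    rw [show (fun (row : List Int) => (row, i).1) = @id (List Int) from rfl, List.modify_id]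
    simp [pvIdxC]
  | cons c cs ih =>
    intro g i
    simp only [List.foldl_cons]
    by_cases hi : i < L
    · rw [show pvFillC L r (g, i) c = (g.modify r (fun row => row.set c i), i + 1) from by
        simp [pvFillC, hi]]
      rw [ih]
      simp only [pvModify_modify, pvIdxC, List.foldl_cons, Prod.mk.injEq]
      refine ⟨?_, ?_⟩
      · congr 1; funext row; simp [pvRowC, hi]
      · simp [hi]
    · rw [show pvFillC L r (g, i) c = (g, i) from by simp [pvFillC, hi]]
      rw [ih]
      simp only [pvIdxC, List.foldl_cons, Prod.mk.injEq]
      refine ⟨?_, ?_⟩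
      · congr 1; funext row; simp [pvRowC, hi]
      · simp [hi]

lemma pvRowfill (L : Int) : ∀ (m c₀ : Nat) (row : List Int) (i : Int), 0 ≤ i → i ≤ L →
    row.length = c₀ + m → (∀ j (hj : j < row.length), c₀ ≤ j → row[j] = -1) →
    ((List.range' c₀ m).foldl (pvRowC L) (row, i)).1
      = row.take c₀ ++ (List.range m).map (fun t : Nat => if i + (t : Int) < L then i + (t : Int) else -1) := by
  intro m
  induction m with
  | zero =>
    intro c₀ row i _ _ hlen _
    rw [List.range_zero, List.map_nil, List.append_nil, List.range'_zero, List.foldl_nil,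
      List.take_of_length_le (by omega)]
  | succ m ih =>
    intro c₀ row i h0 hL hlen hrow
    rw [List.range'_succ, List.foldl_cons]
    by_cases hi : i < L
    · rw [show pvRowC L (row, i) c₀ = (row.set c₀ i, i + 1) from by simp [pvRowC, hi]]
      rw [ih (c₀+1) (row.set c₀ i) (i+1) (by omega) (by omega) (by simp; omega)
        (by intro j hj hcj; rw [List.getElem_set_ne (by omega)]; exact hrow j (by simpa using hj) (by omega))]
      rw [List.take_add_one, List.getElem?_set_self (by omega), List.take_set,
        List.set_eq_of_length_le (by simp [List.length_take])]
      rw [List.range_succ_eq_map, List.map_cons, List.map_map]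
      simp only [Option.toList_some]
      rw [List.append_assoc]
      congr 1
      · simp [hi]
        intro t _
        split_ifs <;> omega
    · -- i = L: nothing ever written
      have hstay : ∀ (cs : List Nat), cs.foldl (pvRowC L) (row, i) = (row, i) := by
        intro cs
        induction cs with
        | nil => rfl
        | cons c cs ihc => rw [List.foldl_cons, show pvRowC L (row, i) c = (row, i) from by simp [pvRowC, hi]]; exact ihc
      rw [show pvRowC L (row, i) c₀ = (row, i) from by simp [pvRowC, hi], hstay]
      have hmap : (List.range (m+1)).map (fun t : Nat => if i + (t : Int) < L then i + (t : Int) else -1)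
          = List.replicate (m+1) (-1 : Int) := by
        rw [List.eq_replicate_iff]
        refine ⟨by simp, ?_⟩
        intro b hb
        rcases List.mem_map.mp hb with ⟨t, _, ht⟩
        rw [if_neg (by omega)] at ht
        omega
      rw [hmap]
      have hdrop : row.drop c₀ = List.replicate (m+1) (-1 : Int) := by
        rw [List.eq_replicate_iff]
        refine ⟨by simp; omega, ?_⟩
        intro b hb
        rcases List.mem_iff_getElem.mp hb with ⟨j, hj, hjb⟩
        rw [List.getElem_drop] at hjb
        rw [← hjb]
        exact hrow (c₀ + j) (by simp at hj; omega) (by omega)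
      rw [← hdrop, List.take_append_drop]

def pvFRow (L : Int) (C r : Nat) : List Int :=
  (List.range C).map (fun c : Nat => if ((r * C + c : Nat) : Int) < L then ((r * C + c : Nat) : Int) else -1)

lemma pvFillAll (L : Int) (C : Nat) (hL : 0 ≤ L) : ∀ (m k₀ : Nat) (g : List (List Int)),
    g.length = k₀ + m →
    (∀ r (hr : r < g.length), k₀ ≤ r → g[r] = List.replicate C (-1)) →
    ((List.range' k₀ m).foldl (fun st r => (List.range C).foldl (pvFillC L r) st)
        (g, min ((k₀ : Int) * C) L)).1
      = g.take k₀ ++ (List.range' k₀ m).map (pvFRow L C) := by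
  intro m
  induction m with
  | zero =>
    intro k₀ g hlen _
    rw [List.range'_zero, List.foldl_nil, List.map_nil, List.append_nil,
      List.take_of_length_le (by omega)]
  | succ m ih =>
    intro k₀ g hlen hg
    rw [List.range'_succ, List.foldl_cons]
    have hk₀ : k₀ < g.length := by omega
    have hmin0 : (0:Int) ≤ min ((k₀:Int) * C) L := by
      have : (0:Int) ≤ (k₀:Int) * C := by positivity
      omega
    have hminL : min ((k₀:Int) * C) L ≤ L := by omega
    set i := min ((k₀:Int) * C) L with hidef
    rw [pvSep L k₀ (List.range C) g i]
    rw [List.modify_eq_set_get _ hk₀]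
    simp only [List.get_eq_getElem]
    have hrowval : ((List.range C).foldl (pvRowC L) (g[k₀], i)).1 = pvFRow L C k₀ := by
      rw [hg k₀ hk₀ le_rfl, List.range_eq_range',
        pvRowfill L C 0 (List.replicate C (-1)) i hmin0 hminL (by simp) (by intro j hj _; simp)]
      rw [List.take_zero, List.nil_append, pvFRow]
      apply List.map_congr_left
      intro t ht
      simp only [List.mem_range] at ht
      have hcast : ((k₀ * C + t : Nat) : Int) = (k₀:Int) * C + t := by push_cast; ring
      rw [hcast]
      rcases le_or_gt ((k₀:Int) * C) L with hcase | hcase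
      · have : i = (k₀:Int) * C := by omega
        rw [this]
      · have : i = L := by omega
        rw [this, if_neg (by omega), if_neg (by omega)]
    rw [hrowval]
    have hidx : pvIdxC L i (List.range C) = min (((k₀+1 : Nat) : Int) * C) L := by
      rw [pvIdxC_spec L _ i hminL, List.length_range]
      have hc : ((k₀ + 1 : Nat) : Int) * C = (k₀:Int) * C + C := by push_cast; ring
      rw [hc]
      omega
    rw [hidx]
    rw [ih (k₀+1) (g.set k₀ (pvFRow L C k₀)) (by simp; omega)
      (by intro r hr hkr
          rw [List.getElem_set_ne (by omega)]
          exact hg r (by simpa using hr) (by omega))]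
    rw [List.take_add_one, List.take_set, List.set_eq_of_length_le (by simp [List.length_take]),
      List.getElem?_set_self hk₀]
    simp [List.append_assoc]


lemma pvLookup (L : Int) (C R : Nat) (r k : Nat) (hr : r < R) (hk : k < C) :
    ((PySem.List.pyGet? ((List.range R).map (pvFRow L C)) (r : Int)).bind
        (fun row => PySem.List.pyGet? row (k : Int))).getD (-1)
      = if ((r * C + k : Nat) : Int) < L then ((r * C + k : Nat) : Int) else -1 := by
  simp [pvFRow, PySem.List.pyGet?_natCast, hr, hk]


lemma pvMapFilter (l : List Nat) (q : Nat → Bool) (f : Nat → Int) :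
    (l.filter q).map f = l.filterMap (fun r => if q r then some (f r) else none) := by
  induction l with
  | nil => rfl
  | cons a l ih =>
    rw [List.filter_cons, List.filterMap_cons]
    by_cases hq : q a
    · rw [if_pos hq, if_pos hq, List.map_cons, ih]
    · rw [if_neg hq, if_neg hq, ih]

lemma pvFilterMapBridge (P : Nat → Prop) [DecidablePred P] (w : Nat → Int) (hw : ∀ r, 0 ≤ w r)
    (l : List Nat) :
    ((l.filter (fun r => decide ((if P r then w r else -1) ≠ -1))).map (fun r => if P r then w r else -1))
      = l.filterMap (fun r => if P r then some (w r) else none) := by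
  rw [pvMapFilter]
  apply List.filterMap_congr
  intro r _
  by_cases hP : P r
  · have := hw r
    rw [if_pos hP, if_pos hP]
    rw [if_pos (by simp; omega)]
  · rw [if_neg hP, if_neg hP]
    rw [if_neg (by simp)]

lemma pvMainCase (L : Int) (R C : Nat) (hL : 0 ≤ L) :
    List.foldl
      (fun acc c =>
        List.foldl
          (fun acc r =>
            let v := ((PySem.List.pyGet?
                (List.foldl
                    (fun st r =>
                      List.foldl
                        (fun (st : List (List Int) × Int) c =>
                          if st.2 < L then (st.1.modify r.toNat fun row => row.set c.toNat st.2, st.2 + 1)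
                          else st)
                        st (PySem.List.pyRange 0 (C : Int)))
                    (List.map (fun _ => List.replicate ((C : Int)).toNat (-1 : Int)) (PySem.List.pyRange 0 (R : Int)), 0)
                    (PySem.List.pyRange 0 (R : Int))).1
                r).bind
              fun row => PySem.List.pyGet? row c).getD (-1)
            if v ≠ -1 then acc ++ [v] else acc)
          acc (PySem.List.pyRange 0 (R : Int)))
      [] (PySem.List.pyRange 0 (C : Int))
    = List.flatMap
        (fun c =>
          List.filterMap (fun r => if r * (C : Int) + c < L then some (r * (C : Int) + c) else none)
            (PySem.List.pyRange 0 (R : Int)))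
        (PySem.List.pyRange 0 (C : Int)) := by
  have hfill :
      (List.foldl
          (fun st r =>
            List.foldl
              (fun (st : List (List Int) × Int) c =>
                if st.2 < L then (st.1.modify r.toNat fun row => row.set c.toNat st.2, st.2 + 1)
                else st)
              st (PySem.List.pyRange 0 (C : Int)))
          (List.map (fun _ => List.replicate ((C : Int)).toNat (-1 : Int)) (PySem.List.pyRange 0 (R : Int)), 0)
          (PySem.List.pyRange 0 (R : Int))).1
        = (List.range R).map (pvFRow L C) := by
    have h := pvFillAll L C hL R 0 (List.replicate R (List.replicate C (-1))) (by simp)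
      (by intro r hr _; simp)
    simp only [Nat.cast_zero, zero_mul, min_eq_left hL, List.take_zero, List.nil_append,
      ← List.range_eq_range'] at h
    simp only [PySem.List.pyRange_zero, List.foldl_map, List.map_map, Int.toNat_natCast,
      Function.comp_def]
    rw [show (List.map (fun _ : Nat => List.replicate C (-1 : Int)) (List.range R))
        = List.replicate R (List.replicate C (-1 : Int)) from by
      simp [List.map_const']]
    exact h
  rw [hfill]
  simp only [PySem.List.pyRange_zero, List.foldl_map, List.flatMap_map, List.filterMap_map,
    Int.toNat_natCast, Function.comp_def]
  simp only [PySem.List.foldl_append_ite (p := fun r : Nat => _ ≠ (-1:Int))]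
  rw [PySem.List.foldl_append_eq_flatMap, List.nil_append]
  apply List.flatMap_congr
  intro k hk
  rw [List.mem_range] at hk
  have hlook : ∀ r ∈ List.range R,
      ((PySem.List.pyGet? ((List.range R).map (pvFRow L C)) (r : Int)).bind
          (fun row => PySem.List.pyGet? row (k : Int))).getD (-1)
        = if ((r * C + k : Nat) : Int) < L then ((r * C + k : Nat) : Int) else -1 := by
    intro r hr
    exact pvLookup L C R r k (List.mem_range.mp hr) hk
  rw [List.filter_congr (fun r hr => by rw [hlook r hr])]
  rw [List.map_congr_left (fun r hr => hlook r (List.mem_of_mem_filter hr))]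
  rw [pvFilterMapBridge (fun r => ((r * C + k : Nat) : Int) < L) (fun r => ((r * C + k : Nat) : Int))
    (fun r => by positivity) (List.range R)]
  congr 1

-- ===== VERDICT (by name: the statement is the Claim_ definition above) =====
theorem perm_indices_for_block_py_spec : Claim_equal_perm_indices_for_block_py := by
  intro L I _hdom hpre
  unfold Spec_perm_indices_for_block_py
  rcases hpre with hI1 | ⟨hI2, hL⟩ | ⟨hIneg, hL0⟩
  · -- I = 1: A returns range(block_len) directly
    subst hI1
    unfold perm_indices_for_block_py perm_indices_for_block_py_alt
    rw [if_pos (by simp)]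
    have hcols : -(PySem.Int.floordiv (-L) 1) = L := by
      rw [PySem.Int.floordiv_eq_ediv_of_pos (by omega)]; simp
    simp only [hcols]
    have h1 : ∀ c ∈ PySem.List.pyRange 0 L 1,
        (PySem.List.pyRange 0 (1:Int) 1).filterMap
          (fun r => if r * L + c < L then some (r * L + c) else none) = [c] := by
      intro c hc
      rw [PySem.List.mem_pyRange_one] at hc
      rw [show PySem.List.pyRange 0 (1:Int) 1 = [0] from by decide]
      simp only [List.filterMap_cons, List.filterMap_nil, zero_mul, zero_add]
      rw [if_pos (by omega)]
    rw [List.flatMap_congr h1, List.flatMap_singleton']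
  · -- 2 ≤ I, 0 ≤ block_len: the general grid case
    have hIpos : (0:Int) < I := by omega
    have hcols0 : 0 ≤ -(PySem.Int.floordiv (-L) I) := by
      rw [PySem.Int.floordiv_eq_ediv_of_pos hIpos]
      have := Int.ediv_le_ediv hIpos (show -L ≤ 0 by omega)
      simp at this; omega
    obtain ⟨C, hC⟩ : ∃ C : Nat, (C:Int) = -(PySem.Int.floordiv (-L) I) :=
      ⟨(-(PySem.Int.floordiv (-L) I)).toNat, Int.toNat_of_nonneg hcols0⟩
    obtain ⟨R, hR⟩ : ∃ R : Nat, (R:Int) = I := ⟨I.toNat, Int.toNat_of_nonneg (by omega)⟩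
    have hne : (I == 1) = false := by simp; omega
    simp only [perm_indices_for_block_py, perm_indices_for_block_py_alt, hne,
      Bool.false_eq_true, if_false]
    rw [← hC, ← hR]
    exact pvMainCase L R C hL
  · -- I ≤ -1, block_len = 0: both sides are empty
    subst hL0
    unfold perm_indices_for_block_py perm_indices_for_block_py_alt
    rw [if_neg (by simp; omega)]
    have hcols : -(PySem.Int.floordiv (-(0:Int)) I) = 0 := by simp [PySem.Int.floordiv]
    simp only [hcols]
    rw [show PySem.List.pyRange 0 (0:Int) 1 = [] from by decide]
    simp
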